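-- pv_equiv track=rewrite | github.com/pfoliodev/Yutopia---Scraping-Project | utils.py | convert_string_to_int
-- ===== SOURCE A (Python) =====
-- def convert_string_to_int(string_element):
--     numbers = []
--     current_number = ""
--
--     for char in string_element:
--         if char.isdigit():
--             current_number += char
--
--         elif current_number:
--             numbers.append(int(current_number))
--             current_number = ""
--
--     if current_number:
--         numbers.append(int(current_number))
--
--     if not numbers:
--         return 0
--
--     return int(''.join(map(str, numbers)))
-- ===== SOURCE B (Python) =====
-- def convert_string_to_int(string_element):
--     # Span-based scan: find each maximal run of digit characters with an
--     # inner while, instead of A's per-character accumulator state machine.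
--     s = string_element
--     runs = []
--     i = 0
--     n = len(s)
--     while i < n:
--         if s[i].isdigit():
--             j = i
--             while j < n and s[j].isdigit():
--                 j += 1
--             runs.append(s[i:j])
--             i = j
--         else:
--             i += 1
--     if not runs:
--         return 0
--     return int(''.join(str(int(r)) for r in runs))
-- ===== Notes on version B (the rewrite author's own statement) =====
-- stated objective: alternative
-- what changed: Replaced A's per-character state machine (a growing current_number accumulator flushed on non-digit boundaries) with a span-based scanner that extracts each maximal digit run directly with an inner while/takeWhile, then converts and joins the runs in one expression.
import Mathlib
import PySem

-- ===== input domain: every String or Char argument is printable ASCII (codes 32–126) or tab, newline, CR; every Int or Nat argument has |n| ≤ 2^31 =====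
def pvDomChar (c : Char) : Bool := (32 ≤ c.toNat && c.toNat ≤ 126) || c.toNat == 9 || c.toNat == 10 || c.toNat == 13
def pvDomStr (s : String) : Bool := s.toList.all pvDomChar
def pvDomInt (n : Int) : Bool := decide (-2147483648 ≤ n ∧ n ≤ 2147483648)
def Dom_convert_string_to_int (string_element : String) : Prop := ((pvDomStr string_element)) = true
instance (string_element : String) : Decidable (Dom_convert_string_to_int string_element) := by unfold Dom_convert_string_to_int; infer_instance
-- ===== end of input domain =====

-- B replaces A's per-character accumulator state machine with a span-based scanner
-- that extracts each maximal digit run directly (objective: alternative; same cost).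


-- ===== PORT A =====
-- int(cur): on the ASCII domain cur is a nonempty digit run, so ofChars? is some;
-- the .getD 0 default is unreachable there (used identically in both ports).
def pvIntOf (cs : List Char) : Int := (PySem.Int.ofChars? cs).getD 0

-- the loop body: append digit to current_number, else flush it into numbers
def pvAStep (st : List Int × List Char) (c : Char) : List Int × List Char :=
  if PySem.Chars.isdigit c then (st.1, st.2 ++ [c])
  else if st.2 ≠ [] then (st.1 ++ [pvIntOf st.2], [])
  else st

def convert_string_to_int (string_element : String) : Int :=
  let st := string_element.toList.foldl pvAStep ([], [])
  let numbers := if st.2 ≠ [] then st.1 ++ [pvIntOf st.2] else st.1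
  if numbers = [] then 0
  else pvIntOf (PySem.Chars.join [] (numbers.map PySem.Int.toChars))

-- ===== PORT B =====
-- maximal digit runs of the string (Source B's span-based scan)
def pvBRuns : List Char → List (List Char)
  | [] => []
  | c :: cs =>
    if PySem.Chars.isdigit c then
      (c :: cs.takeWhile PySem.Chars.isdigit) :: pvBRuns (cs.dropWhile PySem.Chars.isdigit)
    else pvBRuns cs
termination_by cs => cs.length
decreasing_by
  · exact Nat.lt_succ_of_le (List.length_dropWhile_le _ _)
  · exact Nat.lt_succ_self _

def convert_string_to_int_alt (string_element : String) : Int :=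
  let runs := pvBRuns string_element.toList
  if runs = [] then 0
  else pvIntOf (PySem.Chars.join [] (runs.map (fun r => PySem.Int.toChars (pvIntOf r))))

-- ===== PRECONDITION & SPEC =====
def Spec_convert_string_to_int (string_element : String) (out : Int) : Prop := out = convert_string_to_int_alt string_element
instance (string_element : String) (out : Int) : Decidable (Spec_convert_string_to_int string_element out) := by unfold Spec_convert_string_to_int; infer_instance

-- ===== CLAIM (what is proved, stated in full; the proofs are below) =====
def Claim_equal_convert_string_to_int : Prop := ∀ (string_element : String), Dom_convert_string_to_int string_element → Spec_convert_string_to_int string_element (convert_string_to_int string_element)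

-- ===== LEMMAS AND PROOFS =====

-- reference semantics of A's accumulator loop: the runs, given pending run `cur`
def pvRunsAcc (cur : List Char) : List Char → List (List Char)
  | [] => if cur = [] then [] else [cur]
  | c :: cs =>
    if PySem.Chars.isdigit c then pvRunsAcc (cur ++ [c]) cs
    else if cur = [] then pvRunsAcc [] cs else cur :: pvRunsAcc [] cs

def pvFinish (st : List Int × List Char) : List Int :=
  if st.2 ≠ [] then st.1 ++ [pvIntOf st.2] else st.1

theorem pvFoldl_eq_runsAcc (cs : List Char) :
    ∀ (nums : List Int) (cur : List Char),
    pvFinish (cs.foldl pvAStep (nums, cur)) = nums ++ (pvRunsAcc cur cs).map pvIntOf := by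
  induction cs with
  | nil =>
    intro nums cur
    by_cases h : cur = [] <;> simp [pvFinish, pvRunsAcc, h]
  | cons c cs ih =>
    intro nums cur
    simp only [List.foldl_cons, pvAStep, pvRunsAcc]
    by_cases hd : PySem.Chars.isdigit c
    · simp [hd, ih]
    · by_cases hc : cur = []
      · simp [hd, hc, ih]
      · simp [hd, hc, ih]

theorem pvRunsAcc_digits (t : List Char) (h : ∀ c ∈ t, PySem.Chars.isdigit c = true) :
    ∀ (cur cs : List Char), pvRunsAcc cur (t ++ cs) = pvRunsAcc (cur ++ t) cs := by
  induction t with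
  | nil => intro cur cs; simp
  | cons a t ih =>
    intro cur cs
    have ha : PySem.Chars.isdigit a = true := h a (by simp)
    simp only [List.cons_append, pvRunsAcc, ha, if_true]
    rw [ih (fun c hc => h c (by simp [hc]))]
    simp

theorem pvBRuns_eq_runsAcc (cs : List Char) : pvBRuns cs = pvRunsAcc [] cs := by
  induction hn : cs.length using Nat.strong_induction_on generalizing cs with
  | _ n ih =>
  cases cs with
  | nil => simp [pvBRuns, pvRunsAcc]
  | cons c cs =>
    by_cases hd : PySem.Chars.isdigit c
    · rw [pvBRuns, if_pos hd]
      have htw : ∀ x ∈ cs.takeWhile PySem.Chars.isdigit, PySem.Chars.isdigit x = true :=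
        fun x hx => List.mem_takeWhile_imp hx
      have hsplit : cs = cs.takeWhile PySem.Chars.isdigit ++ cs.dropWhile PySem.Chars.isdigit :=
        (List.takeWhile_append_dropWhile).symm
      have hdropLen : (cs.dropWhile PySem.Chars.isdigit).length < n := by
        subst hn; exact Nat.lt_succ_of_le (List.length_dropWhile_le _ _)
      rw [ih _ hdropLen _ rfl]
      simp only [pvRunsAcc, hd, if_true]
      conv_rhs => rw [hsplit]
      rw [show ([] : List Char) ++ [c] = [c] from rfl,
          pvRunsAcc_digits _ htw [c] (cs.dropWhile PySem.Chars.isdigit)]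
      -- now: (c :: takeWhile) :: pvRunsAcc [] drop = pvRunsAcc (c :: takeWhile) drop
      cases hdw : cs.dropWhile PySem.Chars.isdigit with
      | nil => simp [pvRunsAcc]
      | cons d ds =>
        have hnd : PySem.Chars.isdigit d = false := by
          have := List.head?_dropWhile_not PySem.Chars.isdigit cs
          rw [hdw] at this; simpa using this
        simp [pvRunsAcc, hnd]
    · rw [pvBRuns, if_neg hd]
      have hlen : cs.length < n := by subst hn; exact Nat.lt_succ_self _
      rw [ih _ hlen _ rfl]
      simp [pvRunsAcc, hd]

theorem pvA_numbers (cs : List Char) :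
    pvFinish (cs.foldl pvAStep ([], [])) = (pvBRuns cs).map pvIntOf := by
  rw [pvFoldl_eq_runsAcc cs [] [], pvBRuns_eq_runsAcc]; simp

-- ===== VERDICT (by name: the statement is the Claim_ definition above) =====
theorem convert_string_to_int_spec : Claim_equal_convert_string_to_int := by
  intro s _
  unfold Spec_convert_string_to_int
  unfold convert_string_to_int convert_string_to_int_alt
  have h := pvA_numbers s.toList
  simp only [pvFinish] at h
  simp only [h]
  by_cases hr : pvBRuns s.toList = []
  · simp [hr]
  · simp [hr, List.map_map, Function.comp_def]
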